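-- pv_equiv track=rewrite | github.com/tamaron1820/CSE415 | a1-starter-code/a1-starter-code/a1.py | perfect_shuffle
-- ===== SOURCE A (Python) =====
-- def perfect_shuffle(even_list):
--     """Assume even_list is a list of an even number of elements.
--     Return a new list that is the perfect-shuffle of the input.
--     Perfect shuffle means splitting a list into two halves and then interleaving
--     them. For example, the perfect shuffle of [0, 1, 2, 3, 4, 5, 6, 7] is
--     [0, 4, 1, 5, 2, 6, 3, 7]."""
--     a = len(even_list)
--     half = a//2
--     b=even_list[:half]
--     c=even_list[half:]
--     d=[]
--     for i in range(0,half):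
--         d.append(b[i])
--         d.append(c[i])
--     return d
-- ===== SOURCE B (Python) =====
-- def perfect_shuffle(even_list):
--     half = len(even_list) // 2
--     result = [None] * (2 * half)
--     result[0::2] = even_list[:half]
--     result[1::2] = even_list[half:2 * half]
--     return result
-- ===== Notes on version B (the rewrite author's own statement) =====
-- stated objective: idiomatic
-- what changed: Instead of one alternating append loop, B preallocates the output and fills it in two staged strided passes: even positions get the first half, odd positions get the second half, via slice assignments.
import Mathlib
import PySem

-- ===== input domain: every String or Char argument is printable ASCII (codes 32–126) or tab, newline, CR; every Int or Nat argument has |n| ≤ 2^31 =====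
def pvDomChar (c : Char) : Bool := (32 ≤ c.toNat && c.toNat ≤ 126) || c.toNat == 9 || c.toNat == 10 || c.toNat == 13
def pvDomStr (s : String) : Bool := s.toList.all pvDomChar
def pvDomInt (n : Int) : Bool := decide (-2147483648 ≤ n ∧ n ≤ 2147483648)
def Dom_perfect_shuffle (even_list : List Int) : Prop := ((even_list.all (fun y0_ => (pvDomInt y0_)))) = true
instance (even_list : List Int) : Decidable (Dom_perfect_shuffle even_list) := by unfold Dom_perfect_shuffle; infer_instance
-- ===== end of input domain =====

-- B preallocates the output and fills it in two staged strided passes (even positions from the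
-- first half, odd positions from the second half) instead of A's alternating append loop.

-- ===== PORT A =====
def perfect_shuffle (even_list : List Int) : List Int :=
  let a : Int := even_list.length
  let half : Int := PySem.Int.floordiv a 2
  let b := PySem.List.slice even_list none (some half)
  let c := PySem.List.slice even_list (some half) none
  (PySem.List.pyRange 0 half 1).foldl
    (fun d i => (d ++ [PySem.List.pyGetD b i 0]) ++ [PySem.List.pyGetD c i 0]) []

-- ===== PORT B =====
-- strided slice assignment res[off::2] = src (res's length is even, src has exactly length/2 elements)
def sliceAssignStride2 (res : List Int) (off : Nat) (src : List Int) : List Int :=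
  res.mapIdx (fun j x => if j % 2 = off then src.getD (j / 2) 0 else x)

def perfect_shuffle_alt (even_list : List Int) : List Int :=
  let half : Int := PySem.Int.floordiv even_list.length 2
  let result0 : List Int := List.replicate (2 * half).toNat 0   -- placeholder, fully overwritten
  let result1 := sliceAssignStride2 result0 0 (PySem.List.slice even_list none (some half))
  let result2 := sliceAssignStride2 result1 1 (PySem.List.slice even_list (some half) (some (2 * half)))
  result2

-- ===== PRECONDITION & SPEC =====
def Spec_perfect_shuffle (even_list : List Int) (out : List Int) : Prop := out = perfect_shuffle_alt even_list
instance (even_list : List Int) (out : List Int) : Decidable (Spec_perfect_shuffle even_list out) := by unfold Spec_perfect_shuffle; infer_instance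

-- ===== CLAIM =====
def Claim_equal_perfect_shuffle : Prop := ∀ (even_list : List Int), Dom_perfect_shuffle even_list → Spec_perfect_shuffle even_list (perfect_shuffle even_list)

-- ===== LEMMAS AND PROOFS =====

-- A's interleaving flatMap, written as one map over all 2*h output positions
theorem interleave_flatMap_eq_map (b c : List Int) (h : Nat) :
    (List.range h).flatMap (fun k => [b.getD k 0, c.getD k 0])
      = (List.range (2 * h)).map
          (fun j => if j % 2 = 1 then c.getD (j / 2) 0 else b.getD (j / 2) 0) := by
  induction h with
  | zero => simp
  | succ h ih =>
    have h2 : 2 * (h + 1) = (2 * h + 1) + 1 := by omega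
    rw [List.range_succ, List.flatMap_append, ih, h2, List.range_succ, List.range_succ,
      List.map_append, List.map_append]
    have e0 : (2 * h) % 2 = 0 := by omega
    have e1 : (2 * h) / 2 = h := by omega
    have e2 : (2 * h + 1) % 2 = 1 := by omega
    have e3 : (2 * h + 1) / 2 = h := by omega
    simp [e0, e1, e2, e3]

-- B's two strided passes, written as the same single map
theorem assign_assign_eq_map (b c : List Int) (h : Nat) :
    sliceAssignStride2 (sliceAssignStride2 (List.replicate (2 * h) 0) 0 b) 1 c
      = (List.range (2 * h)).map
          (fun j => if j % 2 = 1 then c.getD (j / 2) 0 else b.getD (j / 2) 0) := by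
  apply List.ext_getElem
  · simp [sliceAssignStride2]
  · intro j hj _
    simp only [sliceAssignStride2, List.getElem_mapIdx, List.getElem_map, List.getElem_range,
      List.getElem_replicate]
    rcases Nat.mod_two_eq_zero_or_one j with hm | hm <;> simp [hm]

theorem perfect_shuffle_eq (l : List Int) : perfect_shuffle l = perfect_shuffle_alt l := by
  unfold perfect_shuffle perfect_shuffle_alt
  have hhalf : PySem.Int.floordiv (l.length : Int) 2 = ((l.length / 2 : Nat) : Int) := by
    exact_mod_cast PySem.Int.floordiv_natCast l.length 2
  set h := l.length / 2 with hh
  have h2 : (2 : Int) * ((h : Nat) : Int) = ((h : Nat) : Int) + ((h : Nat) : Int) := by ring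
  simp only [hhalf, h2, PySem.List.slice_to_natCast, PySem.List.slice_from_natCast,
    PySem.List.slice_natCast_add]
  -- A side: fold → flatMap → range-h flatMap with getD
  have hfold :
      (PySem.List.pyRange 0 (h : Int) 1).foldl
        (fun d i => (d ++ [PySem.List.pyGetD (l.take h) i 0]) ++ [PySem.List.pyGetD (l.drop h) i 0]) []
      = (PySem.List.pyRange 0 (h : Int) 1).flatMap
          (fun i => [PySem.List.pyGetD (l.take h) i 0, PySem.List.pyGetD (l.drop h) i 0]) := by
    have := PySem.List.foldl_append_eq_flatMap
      (l := PySem.List.pyRange 0 (h : Int) 1) (acc := ([] : List Int))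
      (g := fun i => [PySem.List.pyGetD (l.take h) i 0, PySem.List.pyGetD (l.drop h) i 0])
    simpa using this
  rw [hfold, PySem.List.pyRange_one]
  have hlen : (((h : Int) - 0).toNat) = h := by omega
  rw [hlen]
  simp only [List.flatMap_map, zero_add, PySem.List.pyGetD_natCast,
    List.getD_eq_getElem?_getD]
  simp only [← List.getD_eq_getElem?_getD]
  rw [interleave_flatMap_eq_map]
  -- B side: the composed strided assignments are the same map, up to take on the second half
  have hB := assign_assign_eq_map (l.take h) ((l.drop h).take h) h
  have hto : ((((h : Nat) : Int) + ((h : Nat) : Int)).toNat) = 2 * h := by omega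
  rw [hto] at *
  rw [hB]
  apply List.map_congr_left
  intro j hj
  rw [List.mem_range] at hj
  have hjh : j / 2 < h := by omega
  rcases Nat.mod_two_eq_zero_or_one j with hm | hm
  · simp [hm, List.getElem?_take, hjh]
  · simp [hm, List.getElem?_take, List.getElem?_drop, hjh]

-- ===== VERDICT =====
theorem perfect_shuffle_spec : Claim_equal_perfect_shuffle := by
  intro l _
  exact perfect_shuffle_eq l
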